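-- pv_equiv track=rewrite | github.com/UP240765/pythonUP240765 | 11_Day/01_Excercises.py | add_all_nums
-- ===== SOURCE A (Python) =====
-- def add_all_nums(nums):
--     sum = 0
--     if type(nums) == list:
--         for num in nums:
--             if type(num) == int:
--                 sum += num
--             else:
--                 return f"One element in the list is not a number"
--     else:
--         if type(nums) == int:
--                 return
--         else:
--             return f"One element in the list is not a number"
--     return sum
-- ===== SOURCE B (Python) =====
-- def _dc(nums, lo, hi):
--     # sum of the valid slice nums[lo:hi] by halving; error string if a non-int is met
--     if hi - lo == 0:
--         return 0
--     if hi - lo == 1: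
--         n = nums[lo]
--         return n if type(n) == int else "One element in the list is not a number"
--     mid = (lo + hi) // 2
--     left = _dc(nums, lo, mid)
--     if type(left) != int:
--         return left
--     right = _dc(nums, mid, hi)
--     if type(right) != int:
--         return right
--     return left + right
--
-- def add_all_nums(nums):
--     if type(nums) != list:
--         return None if type(nums) == int else "One element in the list is not a number"
--     return _dc(nums, 0, len(nums))
-- ===== Notes on version B (the rewrite author's own statement) =====
-- stated objective: alternative
-- what changed: Replaced A's single linear accumulator loop with an index-based divide-and-conquer recursion that splits the slice at its midpoint, sums each half recursively, and combines the partial sums (error propagated from the first failing half).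
import Mathlib
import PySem

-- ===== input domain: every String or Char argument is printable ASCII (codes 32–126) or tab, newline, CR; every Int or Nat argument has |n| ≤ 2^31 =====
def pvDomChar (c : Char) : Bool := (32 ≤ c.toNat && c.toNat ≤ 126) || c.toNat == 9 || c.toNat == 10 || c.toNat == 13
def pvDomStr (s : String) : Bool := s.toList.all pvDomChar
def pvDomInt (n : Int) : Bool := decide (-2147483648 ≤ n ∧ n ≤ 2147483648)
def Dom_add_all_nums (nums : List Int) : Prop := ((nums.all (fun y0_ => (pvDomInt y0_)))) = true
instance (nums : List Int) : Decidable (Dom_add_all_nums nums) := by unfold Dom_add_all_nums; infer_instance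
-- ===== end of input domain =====

-- B replaces A's linear accumulator loop by an index-based divide-and-conquer recursion
-- that sums the two halves of the slice and combines them (objective: alternative).
-- Under the typed domain (nums : List Int) every `type(... ) == int` check is True,
-- so both programs always return the sum (the error-string branch is the `none` arm).

-- ===== PORT A =====
-- A's loop: running accumulator over the elements; `type(num) == int` is True for every Int element.
def add_all_nums_loop (nums : List Int) (sum : Int) : Option Int :=
  match nums with
  | [] => some sum
  | num :: rest =>
    if true then  -- type(num) == int: always true for Int elements
      add_all_nums_loop rest (sum + num)
    else
      none  -- unreachable error-string return branch

def add_all_nums (nums : List Int) : Option Int :=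
  add_all_nums_loop nums 0

-- ===== PORT B =====
-- _dc(nums, lo, hi): sum of nums[lo:hi] by halving; `none` is the error-string result.
def add_all_nums_dc (nums : List Int) (lo hi : Nat) : Option Int :=
  if hi - lo = 0 then some 0
  else if hi - lo = 1 then
    match PySem.List.pyGet? nums (lo : Int) with
    | some n => some n   -- type(n) == int: always true for Int elements
    | none => none       -- IndexError cannot occur on the calls made below
  else
    let mid := (lo + hi) / 2
    match add_all_nums_dc nums lo mid with
    | none => none
    | some left =>
      match add_all_nums_dc nums mid hi with
      | none => none
      | some right => some (left + right)
termination_by hi - lo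
decreasing_by all_goals omega

def add_all_nums_alt (nums : List Int) : Option Int :=
  add_all_nums_dc nums 0 nums.length

-- ===== PRECONDITION & SPEC =====
def Spec_add_all_nums (nums : List Int) (out : Option Int) : Prop := out = add_all_nums_alt nums
instance (nums : List Int) (out : Option Int) : Decidable (Spec_add_all_nums nums out) := by unfold Spec_add_all_nums; infer_instance

-- ===== CLAIM (what is proved, stated in full; the proofs are below) =====
def Claim_equal_add_all_nums : Prop := ∀ (nums : List Int), Dom_add_all_nums nums → Spec_add_all_nums nums (add_all_nums nums)

-- ===== LEMMAS AND PROOFS =====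
theorem add_all_nums_loop_sum (nums : List Int) :
    ∀ acc : Int, add_all_nums_loop nums acc = some (acc + nums.sum) := by
  induction nums with
  | nil => intro acc; simp [add_all_nums_loop]
  | cons n t ih => intro acc; simp [add_all_nums_loop, ih]; ring

theorem add_all_nums_dc_sum (nums : List Int) :
    ∀ k lo hi, hi - lo = k → lo ≤ hi → hi ≤ nums.length →
      add_all_nums_dc nums lo hi = some (((nums.drop lo).take (hi - lo)).sum) := by
  intro k
  induction k using Nat.strong_induction_on with
  | _ k ih =>
    intro lo hi hk hle hlen
    unfold add_all_nums_dc
    by_cases h0 : hi - lo = 0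
    · simp [h0]
    · by_cases h1 : hi - lo = 1
      · have hlt : lo < nums.length := by omega
        have htake : (nums.drop lo).take (hi - lo) = [nums[lo]] := by
          rw [h1, List.drop_eq_getElem_cons hlt, List.take_succ_cons, List.take_zero]
        rw [if_neg h0, if_pos h1, PySem.List.pyGet?_natCast, List.getElem?_eq_getElem hlt, htake]
        simp
      · have hL := ih ((lo + hi) / 2 - lo) (by omega) lo ((lo + hi) / 2) rfl (by omega) (by omega)
        have hR := ih (hi - (lo + hi) / 2) (by omega) ((lo + hi) / 2) hi rfl (by omega) (by omega)
        have hdm : nums.drop ((lo + hi) / 2) = (nums.drop lo).drop ((lo + hi) / 2 - lo) := by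
          rw [List.drop_drop]; congr 1; omega
        have key : (((nums.drop lo).take ((lo + hi) / 2 - lo)).sum)
            + (((nums.drop ((lo + hi) / 2)).take (hi - (lo + hi) / 2)).sum)
            = ((nums.drop lo).take (hi - lo)).sum := by
          rw [hdm, ← List.sum_append, ← List.take_add]
          congr 2
          omega
        rw [if_neg h0, if_neg h1]
        simp only [hL, hR]
        rw [← key]

-- ===== VERDICT (by name: the statement is the Claim_ definition above) =====
theorem add_all_nums_spec : Claim_equal_add_all_nums := by
  intro nums _
  unfold Spec_add_all_nums add_all_nums add_all_nums_alt
  rw [add_all_nums_loop_sum, add_all_nums_dc_sum nums (nums.length - 0) 0 nums.length rfl (Nat.zero_le _) le_rfl]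
  simp
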